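-- pv_equiv track=rewrite | github.com/harjassand/AGI-Stack-Unchained | tools/omega/omega_shadow_proposer_v1.py | _risk_tag
-- ===== SOURCE A (Python) =====
-- def _risk_tag(touched_paths: list[str]) -> str:
--     forbidden = ("meta-core/", "CDEL-v2/cdel/v18_0/verify_rsi_")
--     if any(path.startswith(forbidden) for path in touched_paths):
--         return "HIGH"
--     medium_prefixes = ("Genesis/schema/v18_0/",)
--     if any(path.startswith(medium_prefixes) for path in touched_paths):
--         return "MED"
--     return "LOW"
-- ===== SOURCE B (Python) =====
-- def _risk_tag(touched_paths: list[str]) -> str: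
--     level = 0
--     for path in touched_paths:
--         if path.startswith(("meta-core/", "CDEL-v2/cdel/v18_0/verify_rsi_")):
--             level = max(level, 2)
--         elif path.startswith(("Genesis/schema/v18_0/",)):
--             level = max(level, 1)
--     return "HIGH" if level == 2 else ("MED" if level == 1 else "LOW")
-- ===== Notes on version B (the rewrite author's own statement) =====
-- stated objective: alternative
-- what changed: Replaces the two separate any() passes with a single loop maintaining a running max risk level, decoded to HIGH/MED/LOW at the end.
import Mathlib
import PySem

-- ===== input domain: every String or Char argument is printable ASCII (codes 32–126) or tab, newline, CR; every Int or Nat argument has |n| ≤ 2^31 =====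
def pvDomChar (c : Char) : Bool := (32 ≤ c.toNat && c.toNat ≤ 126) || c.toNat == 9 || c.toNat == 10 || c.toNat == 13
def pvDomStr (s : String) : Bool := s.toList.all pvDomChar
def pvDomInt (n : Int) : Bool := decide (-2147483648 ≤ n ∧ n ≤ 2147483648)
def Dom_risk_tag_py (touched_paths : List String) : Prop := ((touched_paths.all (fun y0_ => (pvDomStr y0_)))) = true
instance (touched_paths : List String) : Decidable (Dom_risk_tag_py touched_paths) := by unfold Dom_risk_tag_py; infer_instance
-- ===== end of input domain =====

-- B replaces the two any() scans with one loop keeping a running max risk level; same cost, different decomposition.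
-- ===== PORT A =====
def risk_tag_py (touched_paths : List String) : String :=
  if touched_paths.any (fun path =>
      PySem.Str.startswith path "meta-core/" || PySem.Str.startswith path "CDEL-v2/cdel/v18_0/verify_rsi_") then
    "HIGH"
  else if touched_paths.any (fun path => PySem.Str.startswith path "Genesis/schema/v18_0/") then
    "MED"
  else
    "LOW"

-- ===== PORT B =====
def riskStep (lv : Int) (path : String) : Int :=
  if PySem.Str.startswith path "meta-core/" || PySem.Str.startswith path "CDEL-v2/cdel/v18_0/verify_rsi_" then
    max lv 2
  else if PySem.Str.startswith path "Genesis/schema/v18_0/" then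
    max lv 1
  else lv

def risk_tag_py_alt (touched_paths : List String) : String :=
  let level := touched_paths.foldl riskStep 0
  if level = 2 then "HIGH" else if level = 1 then "MED" else "LOW"

-- ===== PRECONDITION & SPEC =====
def Spec_risk_tag_py (touched_paths : List String) (out : String) : Prop := out = risk_tag_py_alt touched_paths
instance (touched_paths : List String) (out : String) : Decidable (Spec_risk_tag_py touched_paths out) := by unfold Spec_risk_tag_py; infer_instance

-- ===== CLAIM (what is proved, stated in full; the proofs are below) =====
def Claim_equal_risk_tag_py : Prop := ∀ (touched_paths : List String), Dom_risk_tag_py touched_paths → Spec_risk_tag_py touched_paths (risk_tag_py touched_paths)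

-- ===== LEMMAS AND PROOFS =====

-- The fold computes the max of the (nonnegative) start level and the list's intrinsic level.
set_option maxHeartbeats 1000000 in
theorem foldl_riskStep (tp : List String) (lv : Int) (hlv : 0 ≤ lv) :
    tp.foldl riskStep lv =
      max lv (if tp.any (fun p =>
          PySem.Str.startswith p "meta-core/" || PySem.Str.startswith p "CDEL-v2/cdel/v18_0/verify_rsi_") then 2
        else if tp.any (fun p => PySem.Str.startswith p "Genesis/schema/v18_0/") then 1
        else 0) := by
  induction tp generalizing lv with
  | nil => simp; omega
  | cons h t ih =>
    simp only [List.foldl_cons, List.any_cons]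
    rw [ih (riskStep lv h) (by unfold riskStep; split_ifs <;> omega)]
    simp only [riskStep, Bool.or_eq_true, Int.max_def]
    split_ifs <;> first | omega | tauto

-- ===== VERDICT (by name: the statement is the Claim_ definition above) =====
theorem risk_tag_py_spec : Claim_equal_risk_tag_py := by
  intro tp _
  unfold Spec_risk_tag_py risk_tag_py risk_tag_py_alt
  simp only [foldl_riskStep tp 0 (by omega)]
  split_ifs <;> simp_all
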